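-- pv_equiv track=rewrite | github.com/ak-py/leetcode | analyze_user_web_pattern.py | mostVisitedPattern
-- ===== SOURCE A (Python) =====
-- import collections
-- import itertools
-- from typing import List
--
-- def mostVisitedPattern(username: List[str], timestamp: List[int], website: List[str]) -> List[str]:
--
--     graph = collections.defaultdict(list)
--
--     for t, u, w in sorted(zip(timestamp, username, website)):
--         graph[u].append(w)
--
--     seen_combs = collections.Counter()
--
--     for u, route in graph.items():
--         for combination in set(itertools.combinations(route, 3)):
--             seen_combs[combination] += 1
--
--     pattern = None
--     max_count = 0
--
--     for comb, count in seen_combs.items():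
--
--         # highest count combination is picked
--         if count > max_count:
--             pattern = comb
--             max_count = count
--
--         # if tie then pick lexicographically smaller combination
--         elif count == max_count and pattern > comb:
--             pattern = comb
--
--     return pattern
-- ===== SOURCE B (Python) =====
-- import itertools
-- from typing import List
--
-- def _routes(username, timestamp, website):
--     # group each user's visited websites in time order
--     graph = {}
--     for t, u, w in sorted(zip(timestamp, username, website)):
--         graph[u] = graph.get(u, []) + [w]
--     return list(graph.values())
--
-- def mostVisitedPattern(username: List[str], timestamp: List[int], website: List[str]) -> List[str]:
--     comb_sets = [set(itertools.combinations(r, 3)) for r in _routes(username, timestamp, website)]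
--     candidates = set()
--     for s in comb_sets:
--         candidates |= s
--     if not candidates:
--         return None
--     return min(candidates, key=lambda p: (-sum(p in s for s in comb_sets), p))
-- ===== Notes on version B (the rewrite author's own statement) =====
-- stated objective: alternative
-- what changed: A tallies a Counter by incrementing per user-combination and then runs a manual single-pass argmax/tie-break loop over the counter items; B never builds a counter: it keeps the per-user combination sets, takes their union as the candidate pool, and selects the answer with one min(candidates, key=lambda p: (-membership-count, p)) over that pool.
import Mathlib
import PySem

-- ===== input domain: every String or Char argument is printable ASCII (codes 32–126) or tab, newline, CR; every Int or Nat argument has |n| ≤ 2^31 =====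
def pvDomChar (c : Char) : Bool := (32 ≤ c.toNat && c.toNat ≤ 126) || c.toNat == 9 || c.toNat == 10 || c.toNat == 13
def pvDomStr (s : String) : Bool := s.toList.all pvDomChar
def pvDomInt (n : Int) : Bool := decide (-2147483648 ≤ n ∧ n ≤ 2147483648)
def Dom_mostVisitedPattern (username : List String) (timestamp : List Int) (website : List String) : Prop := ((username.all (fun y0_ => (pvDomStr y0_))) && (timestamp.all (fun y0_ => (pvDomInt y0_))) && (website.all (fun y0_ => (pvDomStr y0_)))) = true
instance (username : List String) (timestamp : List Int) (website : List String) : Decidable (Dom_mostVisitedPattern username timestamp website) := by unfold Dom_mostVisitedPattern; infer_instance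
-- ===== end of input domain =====

-- B replaces A's Counter-increment pass and manual argmax loop by per-pattern membership
-- counting over the users' combination sets and a single min-with-key selection (objective: alternative).

-- Python's lexicographic comparison of the (timestamp, username, website) triples
def pvTriKey (x : Int × String × String) : Int ×ₗ String ×ₗ String := toLex (x.1, toLex (x.2.1, x.2.2))
-- Python's lexicographic comparison of the 3-website pattern tuples
def pvPatKey (p : String × String × String) : String ×ₗ String ×ₗ String := toLex (p.1, toLex (p.2.1, p.2.2))

-- itertools.combinations(l, 2) / (l, 3) as tuples, in CPython's order (used by both Pythons)
def pvCombs2 : List String → List (String × String)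
  | [] => []
  | x :: xs => (xs.map fun b => (x, b)) ++ pvCombs2 xs

def pvCombs3 : List String → List (String × String × String)
  | [] => []
  | x :: xs => ((pvCombs2 xs).map fun bc => (x, bc.1, bc.2)) ++ pvCombs3 xs

-- ===== PORT A =====
-- 'pattern > comb' with pattern = None would raise TypeError in Python; that branch is
-- unreachable (it needs count == max_count and every counter value is ≥ 1 > 0) and is modelled as false.
def mostVisitedPattern (username : List String) (timestamp : List Int) (website : List String) : Option (String × String × String) :=
  let graph : PySem.Dict String (List String) :=
    (PySem.List.sorted (timestamp.zip (username.zip website)) pvTriKey).foldl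
      (fun g x => g.modify x.2.1 [] (· ++ [x.2.2])) PySem.Dict.empty
  let seen : PySem.Dict (String × String × String) Int :=
    graph.items.foldl
      (fun d ur => (PySem.Set.ofList (pvCombs3 ur.2)).foldl (fun d c => d.modify c 0 (· + 1)) d)
      PySem.Dict.empty
  let sel :=
    seen.items.foldl
      (fun st pc =>
        if st.2 < pc.2 then (some pc.1, pc.2)
        else if (decide (pc.2 = st.2) &&
                 (match st.1 with
                  | some p => decide (pvPatKey pc.1 < pvPatKey p)
                  | none => false)) = true then (some pc.1, st.2)
        else st)
      ((none : Option (String × String × String)), (0 : Int))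
  sel.1

-- ===== PORT B =====
def pvRoutes (username : List String) (timestamp : List Int) (website : List String) : List (List String) :=
  ((PySem.List.sorted (timestamp.zip (username.zip website)) pvTriKey).foldl
      (fun g x => g.insert x.2.1 (g.getD x.2.1 [] ++ [x.2.2]))
      (PySem.Dict.empty : PySem.Dict String (List String))).values

def mostVisitedPattern_alt (username : List String) (timestamp : List Int) (website : List String) : Option (String × String × String) :=
  let combSets := (pvRoutes username timestamp website).map (fun r => PySem.Set.ofList (pvCombs3 r))
  let candidates : PySem.Set (String × String × String) :=
    combSets.foldl (fun acc s => PySem.Set.union acc s) PySem.Set.empty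
  if candidates.isEmpty then none
  else PySem.List.min2? candidates
        (fun p => -((combSets.map (fun s => if p ∈ s then (1 : Int) else 0)).sum))
        (fun p => pvPatKey p)

-- ===== PRECONDITION & SPEC =====
def Spec_mostVisitedPattern (username : List String) (timestamp : List Int) (website : List String) (out : Option (String × String × String)) : Prop := out = mostVisitedPattern_alt username timestamp website
instance (username : List String) (timestamp : List Int) (website : List String) (out : Option (String × String × String)) : Decidable (Spec_mostVisitedPattern username timestamp website out) := by unfold Spec_mostVisitedPattern; infer_instance

-- ===== CLAIM (what is proved, stated in full; the proofs are below) =====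
def Claim_equal_mostVisitedPattern : Prop := ∀ (username : List String) (timestamp : List Int) (website : List String), Dom_mostVisitedPattern username timestamp website → Spec_mostVisitedPattern username timestamp website (mostVisitedPattern username timestamp website)

-- ===== LEMMAS AND PROOFS =====

-- number of users whose combination set contains p (the value both programs score patterns by)
def pvCnt (L : List (PySem.Set (String × String × String))) (p : String × String × String) : Int :=
  (L.map (fun s => if p ∈ s then (1 : Int) else 0)).sum

-- 'b scores at least as well as q': strictly more users, or equally many and lexicographically ≤
def pvBetter (L : List (PySem.Set (String × String × String))) (b q : String × String × String) : Prop :=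
  pvCnt L q < pvCnt L b ∨ (pvCnt L b = pvCnt L q ∧ pvPatKey b ≤ pvPatKey q)

theorem pvPatKey_inj {p q : String × String × String} (h : pvPatKey p = pvPatKey q) : p = q := by
  obtain ⟨a1, a2, a3⟩ := p
  obtain ⟨b1, b2, b3⟩ := q
  simp only [pvPatKey, toLex_inj, Prod.mk.injEq] at h
  simp [h.1, h.2.1, h.2.2]

theorem pvBetter_refl (L) (b) : pvBetter L b b := Or.inr ⟨rfl, le_refl _⟩

theorem pvBetter_trans {L} {a b c} (h1 : pvBetter L a b) (h2 : pvBetter L b c) : pvBetter L a c := by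
  rcases h1 with h1 | ⟨h1, h1'⟩ <;> rcases h2 with h2 | ⟨h2, h2'⟩
  · exact Or.inl (lt_trans h2 h1)
  · exact Or.inl (h2 ▸ h1)
  · exact Or.inl (h1 ▸ h2)
  · exact Or.inr ⟨h1.trans h2, le_trans h1' h2'⟩

theorem pvBetter_antisymm {L} {a b} (h1 : pvBetter L a b) (h2 : pvBetter L b a) : a = b := by
  rcases h1 with h1 | ⟨h1, h1'⟩ <;> rcases h2 with h2 | ⟨h2, h2'⟩
  · exact absurd h1 (lt_asymm h2)
  · omega
  · omega
  · exact pvPatKey_inj (le_antisymm h1' h2')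

theorem pvBetter_of_not {L} {b p : String × String × String}
    (h1 : ¬ pvCnt L b < pvCnt L p) (h2 : ¬ (pvCnt L p = pvCnt L b ∧ pvPatKey p < pvPatKey b)) :
    pvBetter L b p := by
  rcases lt_or_eq_of_le (le_of_not_gt h1) with hlt | heq
  · exact Or.inl hlt
  · exact Or.inr ⟨heq.symm, le_of_not_gt (fun hk => h2 ⟨heq.symm ▸ rfl, hk⟩)⟩

theorem pvCnt_nonneg (L) (p) : 0 ≤ pvCnt L p := by
  apply List.sum_nonneg
  intro x hx
  obtain ⟨s, -, rfl⟩ := List.mem_map.mp hx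
  split <;> simp

theorem pvCnt_pos_of_mem {L} {s} {p : String × String × String} (hs : s ∈ L) (hp : p ∈ s) :
    1 ≤ pvCnt L p := by
  induction L with
  | nil => cases hs
  | cons t L ih =>
    simp only [pvCnt, List.map_cons, List.sum_cons] at *
    rcases List.mem_cons.mp hs with rfl | hs
    · have := pvCnt_nonneg L p
      simp only [pvCnt] at this
      simp [hp]; omega
    · have := ih hs
      have h0 : (0:Int) ≤ if p ∈ t then 1 else 0 := by split <;> simp
      omega

-- the Counter's value at p is the number of sets containing p
theorem pvGetD_fold (L : List (PySem.Set (String × String × String)))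
    (h : ∀ s ∈ L, List.Nodup s) (d : PySem.Dict (String × String × String) Int) (p) :
    (L.foldl (fun d s => s.foldl (fun d c => d.modify c 0 (· + 1)) d) d).getD p 0
      = d.getD p 0 + pvCnt L p := by
  induction L generalizing d with
  | nil => simp [pvCnt]
  | cons s L ih =>
    simp only [List.foldl_cons]
    rw [ih (fun t ht => h t (List.mem_cons_of_mem _ ht))]
    rw [PySem.Dict.getD_foldl_modify_add_one]
    have hnd : List.Nodup s := h s (List.mem_cons_self ..)
    have hcount : (List.count p s : Int) = if p ∈ s then 1 else 0 := by
      by_cases hp : p ∈ s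
      · simp [hp, List.count_eq_one_of_mem hnd hp]
      · simp [hp, List.count_eq_zero_of_not_mem hp]
    simp only [pvCnt, List.map_cons, List.sum_cons, hcount]
    ring

theorem pvMemKeys_fold (L : List (PySem.Set (String × String × String)))
    (d : PySem.Dict (String × String × String) Int) (p) :
    p ∈ (L.foldl (fun d s => s.foldl (fun d c => d.modify c 0 (· + 1)) d) d).keys
      ↔ p ∈ d.keys ∨ ∃ s ∈ L, p ∈ s := by
  induction L generalizing d with
  | nil => simp
  | cons s L ih =>
    simp only [List.foldl_cons]
    rw [ih]
    rw [PySem.Dict.keys_foldl_modify s 0 (fun _ _ => (· + 1)) d]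
    rw [PySem.Set.mem_update]
    simp only [List.exists_mem_cons_iff]
    tauto

theorem pvNodupKeys_fold (L : List (PySem.Set (String × String × String)))
    (d : PySem.Dict (String × String × String) Int) (h : d.keys.Nodup) :
    (L.foldl (fun d s => s.foldl (fun d c => d.modify c 0 (· + 1)) d) d).keys.Nodup := by
  induction L generalizing d with
  | nil => exact h
  | cons s L ih =>
    simp only [List.foldl_cons]
    exact ih _ (PySem.Dict.nodup_keys_foldl_modify_key s (fun c => c) 0 (fun _ _ => (· + 1)) d h)

theorem pvMem_unionFold (L : List (PySem.Set (String × String × String)))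
    (acc : PySem.Set (String × String × String)) (p) :
    p ∈ L.foldl (fun acc s => PySem.Set.union acc s) acc ↔ p ∈ acc ∨ ∃ s ∈ L, p ∈ s := by
  induction L generalizing acc with
  | nil => simp
  | cons s L ih =>
    simp only [List.foldl_cons]
    rw [ih, PySem.Set.union, PySem.Set.mem_update]
    simp only [List.exists_mem_cons_iff]
    tauto

-- A's argmax loop, from a live state (some b, cnt b)
theorem pvSelA (L : List (PySem.Set (String × String × String)))
    (l : List ((String × String × String) × Int))
    (hl : ∀ pc ∈ l, pc.2 = pvCnt L pc.1) (b : String × String × String) :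
    ∃ b', (l.foldl
      (fun st pc =>
        if st.2 < pc.2 then (some pc.1, pc.2)
        else if (decide (pc.2 = st.2) &&
                 (match st.1 with
                  | some p => decide (pvPatKey pc.1 < pvPatKey p)
                  | none => false)) = true then (some pc.1, st.2)
        else st)
      ((some b : Option (String × String × String)), pvCnt L b)) = (some b', pvCnt L b')
      ∧ (b' = b ∨ b' ∈ l.map Prod.fst) ∧ pvBetter L b' b ∧ ∀ q ∈ l.map Prod.fst, pvBetter L b' q := by
  induction l generalizing b with
  | nil => exact ⟨b, rfl, Or.inl rfl, pvBetter_refl L b, by simp⟩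
  | cons pc l ih =>
    obtain ⟨p, c⟩ := pc
    have hc : c = pvCnt L p := hl (p, c) (List.mem_cons_self ..)
    subst hc
    have hl' : ∀ pc ∈ l, pc.2 = pvCnt L pc.1 := fun pc h => hl pc (List.mem_cons_of_mem _ h)
    simp only [List.foldl_cons]
    by_cases h1 : pvCnt L b < pvCnt L p
    · obtain ⟨b', hfold, hmem, hbb, hall⟩ := ih hl' p
      refine ⟨b', ?_, ?_, ?_, ?_⟩
      · rw [← hfold]; congr 1; simp [h1]
      · rcases hmem with rfl | hmem
        · exact Or.inr (by simp)
        · exact Or.inr (by simp [hmem])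
      · exact pvBetter_trans hbb (Or.inl h1)
      · intro q hq
        rw [List.map_cons] at hq
        rcases List.mem_cons.mp hq with rfl | hq'
        · exact hbb
        · exact hall _ hq'
    · by_cases h2 : pvCnt L p = pvCnt L b ∧ pvPatKey p < pvPatKey b
      · obtain ⟨b', hfold, hmem, hbb, hall⟩ := ih hl' p
        refine ⟨b', ?_, ?_, ?_, ?_⟩
        · rw [← hfold]; congr 1; simp [h2.1, h2.2]
        · rcases hmem with rfl | hmem
          · exact Or.inr (by simp)
          · exact Or.inr (by simp [hmem])
        · exact pvBetter_trans hbb (Or.inr ⟨h2.1, le_of_lt h2.2⟩)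
        · intro q hq
          rw [List.map_cons] at hq
          rcases List.mem_cons.mp hq with rfl | hq'
          · exact hbb
          · exact hall _ hq'
      · obtain ⟨b', hfold, hmem, hbb, hall⟩ := ih hl' b
        refine ⟨b', ?_, ?_, ?_, ?_⟩
        · rw [← hfold]; congr 1
          have hne : ¬ (pvCnt L p = pvCnt L b ∧ pvPatKey p < pvPatKey b) := h2
          simp only [h1, if_false, ite_eq_right_iff]
          intro hcond
          exfalso
          simp only [Bool.and_eq_true, decide_eq_true_eq] at hcond
          exact hne ⟨hcond.1, hcond.2⟩
        · rcases hmem with rfl | hmem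
          · exact Or.inl rfl
          · exact Or.inr (by simp [hmem])
        · exact hbb
        · intro q hq
          rw [List.map_cons] at hq
          rcases List.mem_cons.mp hq with rfl | hq'
          · exact pvBetter_trans hbb (pvBetter_of_not h1 h2)
          · exact hall _ hq'

-- one comparison step of min(…, key=…)
theorem pvMin2Step {α κ₁ κ₂ : Type} [LT κ₁] [DecidableLT κ₁] [LT κ₂] [DecidableLT κ₂]
    (k1 : α → κ₁) (k2 : α → κ₂) (a b : α) (l : List α) :
    PySem.List.min2? (a :: b :: l) k1 k2
      = PySem.List.min2? ((if (decide (k1 b < k1 a) || (!decide (k1 a < k1 b) && decide (k2 b < k2 a))) = true then b else a) :: l) k1 k2 := by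
  simp only [PySem.List.min2?, List.foldl_cons]
  congr 1
  by_cases hc : (decide (k1 b < k1 a) || (!decide (k1 a < k1 b) && decide (k2 b < k2 a))) = true
  · simp [hc]
  · simp [hc]

-- B's min(…, key=…) over a nonempty candidate list picks a pattern at least as good as every other
theorem pvSelB (L : List (PySem.Set (String × String × String)))
    (l : List (String × String × String)) (c0 : String × String × String) :
    ∃ m, PySem.List.min2? (c0 :: l) (fun p => -(pvCnt L p)) (fun p => pvPatKey p) = some m
      ∧ (m = c0 ∨ m ∈ l) ∧ pvBetter L m c0 ∧ ∀ y ∈ l, pvBetter L m y := by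
  induction l generalizing c0 with
  | nil => exact ⟨c0, rfl, Or.inl rfl, pvBetter_refl L c0, by simp⟩
  | cons x l ih =>
    rw [pvMin2Step]
    by_cases h1 : -(pvCnt L x) < -(pvCnt L c0)
    · rw [if_pos (by simp [h1])]
      obtain ⟨m, hm, hmem, hbet, hall⟩ := ih x
      refine ⟨m, hm, ?_, pvBetter_trans hbet (Or.inl (by omega)), ?_⟩
      · rcases hmem with rfl | h
        · exact Or.inr (by simp)
        · exact Or.inr (by simp [h])
      · intro y hy
        rcases List.mem_cons.mp hy with rfl | hy'
        · exact hbet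
        · exact hall y hy'
    · by_cases h2 : ¬(-(pvCnt L c0) < -(pvCnt L x)) ∧ pvPatKey x < pvPatKey c0
      · rw [if_pos (by simp [h1, h2.1, h2.2])]
        obtain ⟨m, hm, hmem, hbet, hall⟩ := ih x
        refine ⟨m, hm, ?_, pvBetter_trans hbet (Or.inr ⟨by omega, le_of_lt h2.2⟩), ?_⟩
        · rcases hmem with rfl | h
          · exact Or.inr (by simp)
          · exact Or.inr (by simp [h])
        · intro y hy
          rcases List.mem_cons.mp hy with rfl | hy'
          · exact hbet
          · exact hall y hy'
      · rw [if_neg (by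
          simp only [Bool.or_eq_true, Bool.and_eq_true, Bool.not_eq_true', decide_eq_true_eq,
            decide_eq_false_iff_not]
          rintro (h | ⟨hb, hk⟩)
          · exact h1 h
          · exact h2 ⟨hb, hk⟩)]
        obtain ⟨m, hm, hmem, hbet, hall⟩ := ih c0
        have hmx : pvBetter L c0 x := by
          rcases lt_trichotomy (pvCnt L x) (pvCnt L c0) with hlt | heq | hgt
          · exact Or.inl hlt
          · refine Or.inr ⟨heq.symm, ?_⟩
            by_contra hk
            exact h2 ⟨by omega, lt_of_not_ge hk⟩
          · exact absurd (by omega : -(pvCnt L x) < -(pvCnt L c0)) h1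
        refine ⟨m, hm, ?_, hbet, ?_⟩
        · rcases hmem with rfl | h
          · exact Or.inl rfl
          · exact Or.inr (by simp [h])
        · intro y hy
          rcases List.mem_cons.mp hy with rfl | hy'
          · exact pvBetter_trans hbet hmx
          · exact hall y hy'

-- A's Counter loop over graph.items is the canonical fold over the per-user combination sets
theorem pvSeen_eq (G : PySem.Dict String (List String)) :
    G.items.foldl
      (fun d ur => (PySem.Set.ofList (pvCombs3 ur.2)).foldl (fun d c => d.modify c 0 (· + 1)) d)
      (PySem.Dict.empty : PySem.Dict (String × String × String) Int)
    = (G.values.map (fun r => PySem.Set.ofList (pvCombs3 r))).foldl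
        (fun d s => s.foldl (fun d c => d.modify c 0 (· + 1)) d)
        (PySem.Dict.empty : PySem.Dict (String × String × String) Int) := by
  simp only [PySem.Dict.values, List.map_map, List.foldl_map, Function.comp]

-- the heart of the equivalence, over an arbitrary user → route dictionary G
theorem pvMain (G : PySem.Dict String (List String)) :
    ((G.items.foldl
        (fun d ur => (PySem.Set.ofList (pvCombs3 ur.2)).foldl (fun d c => d.modify c 0 (· + 1)) d)
        (PySem.Dict.empty : PySem.Dict (String × String × String) Int)).items.foldl
      (fun st pc =>
        if st.2 < pc.2 then (some pc.1, pc.2)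
        else if (decide (pc.2 = st.2) &&
                 (match st.1 with
                  | some p => decide (pvPatKey pc.1 < pvPatKey p)
                  | none => false)) = true then (some pc.1, st.2)
        else st)
      ((none : Option (String × String × String)), (0 : Int))).1
    = (if ((G.values.map (fun r => PySem.Set.ofList (pvCombs3 r))).foldl
            (fun acc s => PySem.Set.union acc s)
            (PySem.Set.empty : PySem.Set (String × String × String))).isEmpty then none
       else PySem.List.min2?
            ((G.values.map (fun r => PySem.Set.ofList (pvCombs3 r))).foldl
              (fun acc s => PySem.Set.union acc s)
              (PySem.Set.empty : PySem.Set (String × String × String)))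
            (fun p => -(((G.values.map (fun r => PySem.Set.ofList (pvCombs3 r))).map
                (fun s => if p ∈ s then (1 : Int) else 0)).sum))
            (fun p => pvPatKey p)) := by
  rw [pvSeen_eq G]
  set L := G.values.map (fun r => PySem.Set.ofList (pvCombs3 r)) with hL
  set seen := L.foldl (fun d s => s.foldl (fun d c => d.modify c 0 (· + 1)) d)
    (PySem.Dict.empty : PySem.Dict (String × String × String) Int) with hseen
  set C := L.foldl (fun acc s => PySem.Set.union acc s) (PySem.Set.empty : PySem.Set (String × String × String)) with hC
  have hNodupSets : ∀ s ∈ L, List.Nodup s := by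
    intro s hs
    obtain ⟨r, -, rfl⟩ := List.mem_map.mp hs
    exact PySem.Set.nodup_ofList _
  have hkeys : ∀ p, p ∈ seen.keys ↔ ∃ s ∈ L, p ∈ s := by
    intro p
    rw [hseen, pvMemKeys_fold]
    simp
  have hnd : seen.keys.Nodup := by
    rw [hseen]
    exact pvNodupKeys_fold L _ (by simp [PySem.Dict.empty, PySem.Dict.keys])
  have hval : ∀ pc ∈ seen.items, pc.2 = pvCnt L pc.1 := by
    rintro ⟨p, c⟩ hpc
    have h := PySem.Dict.getD_of_mem_items _ hpc hnd 0
    rw [hseen, pvGetD_fold L hNodupSets] at h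
    simpa using h.symm
  have hCmem : ∀ p, p ∈ C ↔ ∃ s ∈ L, p ∈ s := by
    intro p
    rw [hC, pvMem_unionFold]
    simp [PySem.Set.empty]
  have hkeysitems : seen.keys = seen.items.map Prod.fst := by
    simp [PySem.Dict.keys]
  rcases hitems : seen.items with _ | ⟨pc, rest⟩
  · -- no pattern at all: both sides return none
    have hCempty : C = [] := by
      rw [List.eq_nil_iff_forall_not_mem]
      intro p hp
      have hpk : p ∈ seen.keys := (hkeys p).mpr ((hCmem p).mp hp)
      rw [hkeysitems, hitems] at hpk
      simp at hpk
    rw [hCempty]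
    simp
  · -- at least one pattern
    have hpc1k : pc.1 ∈ seen.keys := by rw [hkeysitems, hitems]; simp
    have hpc2 : pc.2 = pvCnt L pc.1 := hval pc (by rw [hitems]; exact List.mem_cons_self ..)
    have hcntpos : 1 ≤ pvCnt L pc.1 := by
      obtain ⟨s, hs, hp⟩ := (hkeys pc.1).mp hpc1k
      exact pvCnt_pos_of_mem hs hp
    obtain ⟨a, hafold, hamem, hab, hall⟩ :=
      pvSelA L rest (fun qc hq => hval qc (by rw [hitems]; exact List.mem_cons_of_mem _ hq)) pc.1
    have hAval : ((pc :: rest).foldl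
        (fun st pc =>
          if st.2 < pc.2 then (some pc.1, pc.2)
          else if (decide (pc.2 = st.2) &&
                   (match st.1 with
                    | some p => decide (pvPatKey pc.1 < pvPatKey p)
                    | none => false)) = true then (some pc.1, st.2)
          else st)
        ((none : Option (String × String × String)), (0 : Int))).1 = some a := by
      rw [List.foldl_cons]
      have hfirst : (if ((none : Option (String × String × String)), (0 : Int)).2 < pc.2
            then (some pc.1, pc.2)
            else if (decide (pc.2 = ((none : Option (String × String × String)), (0 : Int)).2) &&
                     (match ((none : Option (String × String × String)), (0 : Int)).1 with
                      | some p => decide (pvPatKey pc.1 < pvPatKey p)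
                      | none => false)) = true then (some pc.1, ((none : Option (String × String × String)), (0 : Int)).2)
            else ((none : Option (String × String × String)), (0 : Int)))
          = (some pc.1, pvCnt L pc.1) := by
        rw [if_pos (by simp; omega)]
        rw [hpc2]
      rw [hfirst, hafold]
    have hakeys : a ∈ seen.keys := by
      rw [hkeysitems, hitems]
      rcases hamem with rfl | h
      · simp
      · simp [h]
    have hallkeys : ∀ q ∈ seen.keys, pvBetter L a q := by
      intro q hq
      rw [hkeysitems, hitems, List.map_cons] at hq
      rcases List.mem_cons.mp hq with rfl | hq'
      · exact hab
      · exact hall _ hq'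
    -- B's side
    have hCne : pc.1 ∈ C := (hCmem pc.1).mpr ((hkeys pc.1).mp hpc1k)
    rcases hCc : C with _ | ⟨c0, crest⟩
    · rw [hCc] at hCne; cases hCne
    obtain ⟨m, hmfold, hmmem, hmb, hmall⟩ := pvSelB L crest c0
    have hBval : PySem.List.min2? (c0 :: crest)
        (fun p => -((L.map (fun s => if p ∈ s then (1 : Int) else 0)).sum))
        (fun p => pvPatKey p) = some m := by
      have h0 : (fun p : String × String × String => -((L.map (fun s => if p ∈ s then (1 : Int) else 0)).sum))
          = (fun p => -(pvCnt L p)) := rfl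
      rw [h0]
      exact hmfold
    have hmC : ∀ y ∈ C, pvBetter L m y := by
      intro y hy
      rw [hCc] at hy
      rcases List.mem_cons.mp hy with rfl | hy'
      · exact hmb
      · exact hmall y hy'
    have hmkeys : m ∈ seen.keys := by
      refine (hkeys m).mpr ((hCmem m).mp ?_)
      rw [hCc]
      rcases hmmem with rfl | h
      · exact List.mem_cons_self ..
      · exact List.mem_cons_of_mem _ h
    have haC : a ∈ C := (hCmem a).mpr ((hkeys a).mp hakeys)
    have ham : a = m := pvBetter_antisymm (hallkeys m hmkeys) (hmC a haC)
    rw [hAval, ham]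
    simp only [List.isEmpty_cons, Bool.false_eq_true, if_false]
    exact hBval.symm

-- ===== VERDICT (by name: the statement is the Claim_ definition above) =====
theorem mostVisitedPattern_spec : Claim_equal_mostVisitedPattern := by
  intro username timestamp website _
  unfold Spec_mostVisitedPattern mostVisitedPattern mostVisitedPattern_alt pvRoutes
  exact pvMain _
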